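-- pv_equiv track=rewrite | github.com/jramaswami/LeetCode_Python | find_the_closest_palindrome.py | next_palindrome
-- ===== SOURCE A (Python) =====
-- from typing import List
--
-- def next_palindrome(t: List[int]) -> List[int]:
--     x = list(t)
--     left = right = len(t) // 2
--     if len(t) % 2 == 0:
--         left = right - 1
--
--     while left >= 0:
--         if x[left] < 9:
--             a = x[left] + 1
--             x[left] = a
--             x[right] = a
--             return x
--         x[left] = 0
--         x[right] = 0
--         left -= 1
--         right += 1
--
--     # If we have reached here, we are going up 1 digit
--     p = [0] * (len(t) + 1)
--     p[0] = p[-1] = 1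
--     return p
-- ===== SOURCE B (Python) =====
-- from typing import List
--
-- def next_palindrome(t: List[int]) -> List[int]:
--     n = len(t)
--     mid = n // 2
--     hi = mid if n % 2 == 0 else mid + 1      # one past the last "left" index
--     cands = [i for i in range(hi) if t[i] < 9]
--     if not cands:
--         return [1] + [0] * (n - 1) + [1] if n else [1]
--     j = cands[-1]
--     rj = mid + (hi - 1 - j)
--     if rj == j:
--         return t[:j] + [t[j] + 1] + t[j+1:]
--     return t[:j] + [t[j] + 1] + [0] * (rj - j - 1) + [t[j] + 1] + t[rj+1:]
-- ===== Notes on version B (the rewrite author's own statement) =====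
-- stated objective: simpler
-- what changed: A mutates a copy in a while loop walking from the centre outwards, zeroing mirrored pairs until a digit below 9 is found; B instead finds the last incrementable left-half index with one forward comprehension and assembles the result immutably from slices, a zero block and the bumped digit pair (the all-nines overflow case built directly).
import Mathlib
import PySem

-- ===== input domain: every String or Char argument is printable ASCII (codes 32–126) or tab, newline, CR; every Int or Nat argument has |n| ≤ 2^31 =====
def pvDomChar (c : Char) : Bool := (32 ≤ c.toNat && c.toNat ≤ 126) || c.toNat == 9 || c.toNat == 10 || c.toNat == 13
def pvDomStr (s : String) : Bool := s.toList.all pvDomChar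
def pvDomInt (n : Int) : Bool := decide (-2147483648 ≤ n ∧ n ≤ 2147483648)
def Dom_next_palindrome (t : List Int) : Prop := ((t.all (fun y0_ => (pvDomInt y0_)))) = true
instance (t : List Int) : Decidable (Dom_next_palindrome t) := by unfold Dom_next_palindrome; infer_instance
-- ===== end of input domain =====

-- B replaces A's in-place middle-outward mutation loop by a forward scan for the last
-- incrementable left digit plus a closed-form slice construction (objective: simpler).

-- ===== PORT A =====
-- A's while loop; fuel k = left + 1 (all reads/writes are at provably in-range
-- nonnegative indices, so getD/set are exact for Python's x[i] / x[i] = v here);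
-- returns none when the loop falls through to the carry-overflow tail
def loopA : List Int → Nat → Nat → Option (List Int)
  | _, 0, _ => none
  | x, (k+1), r =>
    if x.getD k 0 < 9 then
      let a := x.getD k 0 + 1
      some ((x.set k a).set r a)
    else
      loopA ((x.set k 0).set r 0) k (r+1)

def next_palindrome (t : List Int) : List Int :=
  let n := t.length
  let right := n / 2
  -- fuel = left + 1: left = right - 1 if n even else right
  let k0 := if n % 2 == 0 then right else right + 1
  match loopA t k0 right with
  | some y => y
  | none => ((List.replicate (n+1) 0).set 0 1).set n 1   -- p[0] = p[-1] = 1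

-- ===== PORT B =====
def next_palindrome_alt (t : List Int) : List Int :=
  let n := t.length
  let mid := n / 2
  let hi := if n % 2 == 0 then mid else mid + 1
  let cands := (List.range hi).filter (fun i => t.getD i 0 < 9)
  match cands.getLast? with
  | none => if n == 0 then [1] else [1] ++ List.replicate (n-1) 0 ++ [1]
  | some j =>
    let rj := mid + (hi - 1 - j)
    -- python slices t[:j], t[j+1:], t[rj+1:] with 0 ≤ index ≤ len: take/drop are exact
    if rj == j then t.take j ++ [t.getD j 0 + 1] ++ t.drop (j+1)
    else t.take j ++ [t.getD j 0 + 1] ++ List.replicate (rj - j - 1) 0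
           ++ [t.getD j 0 + 1] ++ t.drop (rj+1)

-- ===== PRECONDITION & SPEC =====
def Spec_next_palindrome (t : List Int) (out : List Int) : Prop := out = next_palindrome_alt t
instance (t : List Int) (out : List Int) : Decidable (Spec_next_palindrome t out) := by unfold Spec_next_palindrome; infer_instance

-- ===== CLAIM (what is proved, stated in full; the proofs are below) =====
def Claim_equal_next_palindrome : Prop := ∀ (t : List Int), Dom_next_palindrome t → Spec_next_palindrome t (next_palindrome t)

-- ===== LEMMAS AND PROOFS =====

-- the last left index with digit < 9, as B computes it
def lastLt (x : List Int) (k : Nat) : Option Nat :=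
  ((List.range k).filter (fun i => x.getD i 0 < 9)).getLast?

-- what the loop does once it has found that index: zero outward, then bump the pair
def build (x : List Int) (k r j : Nat) : List Int :=
  if k ≤ j + 1 then
    (x.set j (x.getD j 0 + 1)).set r (x.getD j 0 + 1)
  else
    build ((x.set (k-1) 0).set r 0) (k-1) (r+1) j
termination_by k
decreasing_by omega

lemma getD_set_ne (x : List Int) (a : Nat) (v : Int) (i : Nat) (h : a ≠ i) :
    (x.set a v).getD i 0 = x.getD i 0 := by
  simp [List.getD, List.getElem?_set_ne h]

lemma take_set_ge (x : List Int) (a : Nat) (v : Int) (j : Nat) (h : j ≤ a) :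
    (x.set a v).take j = x.take j := by
  rw [List.take_set]
  exact List.set_eq_of_length_le (by simp; omega)

lemma drop_set_lt (x : List Int) (a : Nat) (v : Int) (i : Nat) (h : a < i) :
    (x.set a v).drop i = x.drop i := by
  rw [List.drop_set, if_pos h]

lemma set_split (x : List Int) (i : Nat) (v : Int) (h : i < x.length) :
    x.set i v = x.take i ++ v :: x.drop (i+1) :=
  (List.set_eq_take_append_cons_drop).trans (if_pos h)

lemma lastLt_step (x : List Int) (k : Nat) :
    lastLt x (k+1) = if x.getD k 0 < 9 then some k else lastLt x k := by
  unfold lastLt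
  rw [List.range_succ, List.filter_append]
  by_cases h : x.getD k 0 < 9
  · rw [if_pos h]
    have h' : x[k]?.getD 0 < 9 := by simpa [List.getD] using h
    have hf : List.filter (fun i => decide (x.getD i 0 < 9)) [k] = [k] := by
      simp [List.getD, h']
    rw [hf, List.getLast?_concat]
  · rw [if_neg h]
    have h' : ¬ x[k]?.getD 0 < 9 := by simpa [List.getD] using h
    have hf : List.filter (fun i => decide (x.getD i 0 < 9)) [k] = [] := by
      simp [List.getD]; omega
    rw [hf, List.append_nil]

lemma lastLt_set (x : List Int) (k a : Nat) (v : Int) (h : k ≤ a) :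
    lastLt (x.set a v) k = lastLt x k := by
  unfold lastLt
  congr 1
  apply List.filter_congr
  intro i hi
  have hne : a ≠ i := by have := List.mem_range.mp hi; omega
  simp [List.getElem?_set_ne hne]

lemma lastLt_lt (x : List Int) (k j : Nat) (h : lastLt x k = some j) :
    j < k ∧ x.getD j 0 < 9 := by
  have hm : j ∈ (List.range k).filter (fun i => x.getD i 0 < 9) :=
    List.mem_of_getLast? h
  have hmf := List.mem_filter.mp hm
  exact ⟨List.mem_range.mp hmf.1, by simpa using hmf.2⟩

lemma loopA_eq : ∀ (k : Nat) (x : List Int) (r : Nat), k ≤ r + 1 →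
    loopA x k r = (lastLt x k).map (fun j => build x k r j) := by
  intro k
  induction k with
  | zero => intro x r _; simp [loopA, lastLt]
  | succ k ih =>
    intro x r hr
    rw [loopA, lastLt_step]
    by_cases h : x.getD k 0 < 9
    · rw [if_pos h, if_pos h, Option.map_some]
      rw [build.eq_def, if_pos (by omega)]
    · rw [if_neg h, if_neg h]
      rw [ih _ (r+1) (by omega)]
      rw [lastLt_set _ _ _ _ (by omega), lastLt_set _ _ _ _ (by omega)]
      cases hL : lastLt x k with
      | none => simp
      | some j =>
        have hj := (lastLt_lt x k j hL).1
        simp only [Option.map_some, Option.some.injEq]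
        conv_rhs => rw [build.eq_def]
        rw [if_neg (by omega : ¬ (k + 1 ≤ j + 1))]
        simp

lemma rep_swap (d : Nat) (L : List Int) :
    List.replicate d (0:Int) ++ 0 :: L = 0 :: (List.replicate d 0 ++ L) := by
  induction d with
  | zero => simp
  | succ d ih => simp [List.replicate_succ, ih]

-- the core characterisation of build: left zero block d, untouched gap g, right zero block d
lemma build_g : ∀ (d : Nat) (x : List Int) (j g : Nat),
    j + 2*d + g + 2 ≤ x.length →
    build x (j+1+d) (j+1+d+g) j =
      x.take j ++ (x.getD j 0 + 1) ::
        (List.replicate d 0 ++ (x.drop (j+1+d)).take g ++ List.replicate d 0)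
        ++ (x.getD j 0 + 1) :: x.drop (j+2*d+g+2) := by
  intro d
  induction d with
  | zero =>
    intro x j g hlen
    simp only [Nat.mul_zero, Nat.add_zero, List.replicate_zero, List.nil_append,
      List.append_nil]
    rw [build.eq_def, if_pos (by omega)]
    have h1 : j < x.length := by omega
    rw [set_split _ _ _ h1]
    have h2 : j + 1 + g < (x.take j ++ (x.getD j 0 + 1) :: x.drop (j+1)).length := by
      simp; omega
    rw [set_split _ _ _ h2]
    have hlj : (x.take j).length = j := by simp; omega
    have hTake : ((x.take j ++ (x.getD j 0 + 1) :: x.drop (j+1)).take (j+1+g))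
        = x.take j ++ (x.getD j 0 + 1) :: (x.drop (j+1)).take g := by
      rw [List.take_append, List.take_of_length_le (by omega : (x.take j).length ≤ j+1+g), hlj]
      rw [show j + 1 + g - j = g + 1 by omega]
      simp
    have hDrop : ((x.take j ++ (x.getD j 0 + 1) :: x.drop (j+1)).drop (j+1+g+1))
        = x.drop (j + g + 2) := by
      rw [List.drop_append, List.drop_of_length_le (by omega : (x.take j).length ≤ j+1+g+1), hlj]
      rw [show j + 1 + g + 1 - j = g + 2 by omega]
      simp only [List.nil_append, List.drop_succ_cons, List.drop_drop]
      congr 1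
      omega
    rw [hTake, hDrop]
  | succ d ih =>
    intro x j g hlen
    rw [build.eq_def, if_neg (by omega)]
    rw [show j + 1 + (d+1) - 1 = j + 1 + d by omega]
    rw [show j + 1 + (d+1) + g = j + 1 + d + (g+1) by omega]
    set x' := ((x.set (j+1+d) 0).set (j+1+d+(g+1)) 0) with hx'
    rw [show j + 1 + d + (g+1) + 1 = j + 1 + d + (g+2) by omega]
    rw [show j + 1 + (d+1) = j + 1 + d + 1 by omega]
    rw [ih x' j (g+2) (by simp [hx']; omega)]
    have hgj : x'.getD j 0 = x.getD j 0 := by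
      rw [hx', getD_set_ne _ _ _ _ (by omega), getD_set_ne _ _ _ _ (by omega)]
    have htj : x'.take j = x.take j := by
      rw [hx', take_set_ge _ _ _ _ (by omega), take_set_ge _ _ _ _ (by omega)]
    have hdrop2 : x'.drop (j+2*d+(g+2)+2) = x.drop (j+2*(d+1)+g+2) := by
      rw [hx', drop_set_lt _ _ _ _ (by omega), drop_set_lt _ _ _ _ (by omega)]
      congr 1
      omega
    have hmid : (x'.drop (j+1+d)).take (g+2)
        = 0 :: ((x.drop (j+1+d+1)).take g ++ [0]) := by
      have hD : x'.drop (j+1+d) = ((x.drop (j+1+d)).set 0 0).set (g+1) 0 := by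
        rw [hx', List.drop_set, if_neg (by omega), List.drop_set, if_neg (by omega)]
        rw [show j+1+d+(g+1) - (j+1+d) = g+1 by omega, show j+1+d - (j+1+d) = 0 by omega]
      rw [hD, List.take_set, List.take_set]
      have hcons : x.drop (j+1+d) = x.getD (j+1+d) 0 :: x.drop (j+1+d+1) := by
        rw [List.drop_eq_getElem_cons (by omega : j+1+d < x.length)]
        congr 1
        simp [List.getD, List.getElem?_eq_getElem (by omega : j+1+d < x.length)]
      rw [hcons]
      simp only [List.take_succ_cons, List.set_cons_zero, List.set_cons_succ]
      congr 1
      have hlt : ((x.drop (j+1+d+1)).take (g+1)).length = g + 1 := by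
        simp; omega
      have hdg : List.drop (g+1) ((x.drop (j+1+d+1)).take (g+1)) = [] :=
        List.drop_of_length_le (by rw [hlt])
      have htt : List.take g ((x.drop (j+1+d+1)).take (g+1)) = (x.drop (j+1+d+1)).take g := by
        rw [List.take_take, show min g (g+1) = g by omega]
      rw [set_split _ _ _ (by rw [hlt]; omega), htt, hdg]
    rw [hgj, htj, hdrop2, hmid]
    simp [rep_swap, List.replicate_succ]

-- the overflow lists agree
lemma overflow_eq (n : Nat) :
    ((List.replicate (n+1) (0:Int)).set 0 1).set n 1
      = if n = 0 then [1] else 1 :: (List.replicate (n-1) 0 ++ [1]) := by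
  cases n with
  | zero => decide
  | succ m =>
    rw [if_neg (Nat.succ_ne_zero m)]
    rw [List.replicate_succ, List.set_cons_zero, List.set_cons_succ]
    congr 1
    simp only [Nat.succ_sub_one]
    induction m with
    | zero => decide
    | succ m' ihm =>
      rw [List.replicate_succ, List.set_cons_succ, ihm]
      simp [List.replicate_succ]

theorem next_palindrome_spec : Claim_equal_next_palindrome := by
  intro t _
  unfold Spec_next_palindrome next_palindrome next_palindrome_alt
  simp only []
  set n := t.length with hn
  set mid := n / 2 with hmid
  set hi := if n % 2 == 0 then mid else mid + 1 with hhi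
  have hk : hi ≤ mid + 1 := by rw [hhi]; split <;> omega
  rw [loopA_eq hi t mid (by omega)]
  cases hL : lastLt t hi with
  | none =>
    have hL' : ((List.range hi).filter (fun i => t.getD i 0 < 9)).getLast? = none := by
      simpa [lastLt] using hL
    rw [hL']
    simp only [Option.map_none]
    rw [overflow_eq]
    by_cases h0 : n = 0
    · simp [h0]
    · simp [h0]
  | some j =>
    obtain ⟨hjk, hj9⟩ := lastLt_lt t hi j hL
    have hL' : ((List.range hi).filter (fun i => t.getD i 0 < 9)).getLast? = some j := by
      simpa [lastLt] using hL
    rw [hL']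
    simp only [Option.map_some]
    have hpar : (hi = mid ∧ n = 2*mid) ∨ (hi = mid + 1 ∧ n = 2*mid+1) := by
      by_cases hp : n % 2 = 0
      · left; exact ⟨by rw [hhi]; simp [hp], by omega⟩
      · right; exact ⟨by rw [hhi]; simp [hp], by omega⟩
    rcases hpar with ⟨he, hne⟩ | ⟨he, hne⟩
    · -- even length: the loop's pairs are adjacent around the centre (gap 0)
      have hb := build_g (mid-1-j) t j 0 (by omega)
      simp only [List.take_zero, List.append_nil, Nat.add_zero] at hb
      rw [← List.replicate_add] at hb
      rw [show j+1+(mid-1-j) = hi by omega] at hb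
      rw [he] at hb ⊢
      rw [hb]
      rw [if_neg (by simp; omega)]
      rw [show j + 2*(mid-1-j) + 2 = mid + (mid-1-j) + 1 by omega]
      rw [show (mid-1-j) + (mid-1-j) = mid + (mid-1-j) - j - 1 by omega]
      simp
    · -- odd length
      rcases Nat.lt_or_ge j mid with hjm | hjm
      · -- j strictly left of centre: first pair overlaps at the centre, then gap 1
        rw [show hi = mid + 1 from he]
        have hstep : build t (mid+1) mid j = build (t.set mid 0) mid (mid+1) j := by
          rw [build.eq_def, if_neg (by omega)]
          rw [show mid+1-1 = mid by omega, List.set_set]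
        rw [hstep]
        have hb := build_g (mid-1-j) (t.set mid 0) j 1 (by simp; omega)
        rw [show j+1+(mid-1-j) = mid by omega] at hb
        -- rewrite the pieces of (t.set mid 0) back to t
        rw [getD_set_ne _ _ _ _ (by omega)] at hb
        rw [take_set_ge _ _ _ _ (by omega)] at hb
        rw [drop_set_lt _ _ _ _ (by omega : mid < j + 2*(mid-1-j) + 1 + 2)] at hb
        have hm1 : ((t.set mid 0).drop mid).take 1 = [0] := by
          have hc : List.drop mid t = t.getD mid 0 :: List.drop (mid+1) t := by
            rw [List.drop_eq_getElem_cons (by omega : mid < t.length)]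
            simp [List.getD, List.getElem?_eq_getElem (by omega : mid < t.length)]
          rw [List.drop_set, if_neg (by omega), show mid - mid = 0 by omega, hc]
          simp
        rw [hm1] at hb
        rw [hb]
        rw [if_neg (by simp; omega)]
        rw [show j + 2*(mid-1-j) + 1 + 2 = mid + (mid + 1 - 1 - j) + 1 by omega]
        have hz : List.replicate (mid-1-j) (0:Int) ++ [0] ++ List.replicate (mid-1-j) 0
            = List.replicate (mid + (mid + 1 - 1 - j) - j - 1) 0 := by
          rw [List.append_assoc, List.singleton_append,
            show (0:Int) :: List.replicate (mid-1-j) 0 = List.replicate ((mid-1-j)+1) 0 from rfl,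
            ← List.replicate_add]
          congr 1
          omega
        rw [← hz]
        simp
      · -- j is the exact centre: a single bumped digit
        have hjm' : j = mid := by omega
        rw [build.eq_def, if_pos (by omega), ← hjm', List.set_set]
        rw [show j + (hi - 1 - j) = j by omega]
        rw [if_pos (by simp)]
        rw [set_split _ _ _ (by omega)]
        simp
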